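-- pv_equiv track=rewrite | github.com/YabseraBogale/flask_project | freelanceEthiopa/test.py | StackOfCompany
-- ===== SOURCE A (Python) =====
-- def StackOfCompany(lst,msg):
--     Company={}
--     for i in lst:
--         if(msg.count(i)!=0 and i not in Company):
--             Company[i]=msg.count(i)
--         elif(msg.count(i)!=0 and i in Company):
--             Company[i]+=msg.count(i)
--     return Company
-- ===== SOURCE B (Python) =====
-- def StackOfCompany(lst, msg):
--     counts = {}
--     for i in lst:
--         counts[i] = counts.get(i, 0) + 1
--     Company = {}
--     for i, freq in counts.items():
--         c = msg.count(i)
--         if c != 0: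
--             Company[i] = c * freq
--     return Company
-- ===== Notes on version B (the rewrite author's own statement) =====
-- stated objective: faster
-- what changed: B builds a frequency table of lst once and scans msg once per DISTINCT element, multiplying count*frequency, instead of re-scanning msg (twice per branch test plus once per assignment) for every occurrence in lst.
import Mathlib
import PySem

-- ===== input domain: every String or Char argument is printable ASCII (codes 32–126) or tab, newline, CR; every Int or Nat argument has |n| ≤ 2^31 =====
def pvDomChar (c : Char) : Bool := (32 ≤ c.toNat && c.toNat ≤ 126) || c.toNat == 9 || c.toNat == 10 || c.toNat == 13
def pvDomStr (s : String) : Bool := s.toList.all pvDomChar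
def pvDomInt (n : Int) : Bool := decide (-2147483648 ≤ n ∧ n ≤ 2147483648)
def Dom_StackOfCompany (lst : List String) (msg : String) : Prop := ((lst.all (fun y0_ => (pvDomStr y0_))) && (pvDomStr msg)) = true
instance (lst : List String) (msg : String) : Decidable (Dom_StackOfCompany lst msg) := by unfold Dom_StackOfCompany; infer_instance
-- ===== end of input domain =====

-- B builds a frequency table of lst once and does one msg.count per distinct element
-- (count * frequency) instead of A's per-occurrence rescans of msg; same return value.

-- ===== PORT A =====
def StackOfCompany (lst : List String) (msg : String) : List (String × Int) :=
  (lst.foldl (fun Company i =>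
    if PySem.Str.count msg i != 0 && !(Company.contains i) then
      Company.insert i (PySem.Str.count msg i : Int)
    else if PySem.Str.count msg i != 0 && Company.contains i then
      Company.insert i (Company.getD i 0 + (PySem.Str.count msg i : Int))
    else Company) (PySem.Dict.empty)).items

-- ===== PORT B =====
def StackOfCompany_alt (lst : List String) (msg : String) : List (String × Int) :=
  let counts := lst.foldl (fun d i => d.insert i (d.getD i 0 + 1)) PySem.Dict.empty
  (counts.items.foldl (fun Company p =>
    let c : Int := (PySem.Str.count msg p.1 : Int)
    if c != 0 then Company.insert p.1 (c * p.2) else Company) PySem.Dict.empty).items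

-- ===== PRECONDITION & SPEC =====
def Spec_StackOfCompany (lst : List String) (msg : String) (out : List (String × Int)) : Prop := out = StackOfCompany_alt lst msg
instance (lst : List String) (msg : String) (out : List (String × Int)) : Decidable (Spec_StackOfCompany lst msg out) := by unfold Spec_StackOfCompany; infer_instance

-- ===== CLAIM (what is proved, stated in full; the proofs are below) =====
def Claim_equal_StackOfCompany : Prop := ∀ (lst : List String) (msg : String), Dom_StackOfCompany lst msg → Spec_StackOfCompany lst msg (StackOfCompany lst msg)

-- ===== LEMMAS AND PROOFS =====
-- Both ports are shown equal to the same normal form: the first occurrences of lst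
-- (pvFO), keeping keys with nonzero msg.count, each mapped to msg.count * lst.count.


def pvFO : List String → List String
  | [] => []
  | i :: l => i :: (pvFO l).filter (fun k => k != i)

theorem pv_filter_fo_step (l : List String) (i : String) (pred : String → Bool)
    (hi : pred i = false) :
    ((pvFO l).filter (fun k => k != i)).filter pred = (pvFO l).filter pred := by
  rw [List.filter_filter]
  apply List.filter_congr
  intro k _
  by_cases h : k = i
  · subst h; simp [hi]
  · simp [h]

theorem pv_cfold (lst : List String) : ∀ (d : PySem.Dict String Int), d.keys.Nodup →
    (lst.foldl (fun d i => d.insert i (d.getD i 0 + 1)) d).items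
      = d.items.map (fun p => (p.1, p.2 + (lst.count p.1 : Int)))
        ++ ((pvFO lst).filter (fun k => !(d.contains k))).map (fun k => (k, (lst.count k : Int))) := by
  induction lst with
  | nil => intro d hd; simp [pvFO]
  | cons i lst ih =>
    intro d hd
    simp only [List.foldl_cons]
    by_cases h2 : d.contains i = true
    · rw [ih (d.insert i (d.getD i 0 + 1))
        (by rw [PySem.Dict.keys_insert_of_contains d _ h2]; exact hd)]
      rw [PySem.Dict.items_insert_of_contains d _ h2]
      congr 1
      · -- mapped items part
        rw [List.map_map]
        apply List.map_congr_left
        intro p hp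
        by_cases hpi : p.1 = i
        · have hv : d.getD i 0 = p.2 := by
            have : (i, p.2) ∈ d.items := by rw [← hpi]; exact hp
            exact PySem.Dict.getD_of_mem_items d this hd 0
          simp only [Function.comp_apply, hpi, beq_self_eq_true, if_pos]
          simp [hv, List.count_cons, hpi]
          ring
        · have : (p.1 == i) = false := by simp [hpi]
          simp only [Function.comp_apply, this, Bool.false_eq_true, if_neg]
          simp [List.count_cons]
          exact fun h => hpi h.symm
      · -- fresh-keys part
        have hpred : ∀ k, ((d.insert i (d.getD i 0 + 1)).contains k) = ((k == i) || d.contains k) := by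
          intro k; rw [PySem.Dict.contains_insert]
        have h1 : (pvFO (i :: lst)).filter (fun k => !(d.contains k))
            = ((pvFO lst).filter (fun k => k != i)).filter (fun k => !(d.contains k)) := by
          simp [pvFO, h2]
        rw [h1, pv_filter_fo_step _ _ _ (by simp [h2])]
        have h3 : ((pvFO lst).filter (fun k => !((d.insert i (d.getD i 0 + 1)).contains k)))
            = ((pvFO lst).filter (fun k => !(d.contains k))) := by
          apply List.filter_congr
          intro k _
          rw [PySem.Dict.contains_insert]
          by_cases hki : k = i
          · simp [hki, h2]
          · simp [hki]
        rw [h3]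
        apply List.map_congr_left
        intro k hk
        have hki : k ≠ i := by
          rcases List.mem_filter.mp hk with ⟨_, hc⟩
          intro h; rw [h] at hc; simp [h2] at hc
        simp [List.count_cons, Ne.symm hki]
    · have h2' : d.contains i = false := by simpa using h2
      have hni : i ∉ d.keys := fun h => h2 ((PySem.Dict.contains_iff_mem_keys d i).mpr h)
      rw [ih (d.insert i (d.getD i 0 + 1))
        (by rw [PySem.Dict.keys_insert_of_not_contains d _ h2']; simp [List.nodup_append, hd]; exact fun a ha h => hni (h ▸ ha))]
      rw [PySem.Dict.items_insert_of_not_contains d _ h2',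
          PySem.Dict.getD_of_not_contains d 0 h2']
      have h3 : ((pvFO lst).filter (fun k => !((d.insert i (0 + 1)).contains k)))
          = ((pvFO lst).filter (fun k => k != i)).filter (fun k => !(d.contains k)) := by
        rw [List.filter_filter]
        apply List.filter_congr
        intro k _
        rw [PySem.Dict.contains_insert]
        by_cases hki : k = i
        · simp [hki]
        · simp only [Bool.not_or, bne]
          exact Bool.and_comm _ _
      rw [h3]
      have h4 : (pvFO (i :: lst)).filter (fun k => !(d.contains k))
          = i :: ((pvFO lst).filter (fun k => k != i)).filter (fun k => !(d.contains k)) := by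
        simp [pvFO, h2']
      rw [h4]
      simp only [List.map_append, List.map_cons, List.map_nil, List.append_assoc,
        List.cons_append, List.nil_append]
      congr 1
      · apply List.map_congr_left
        intro p hp
        have hpi : p.1 ≠ i := by
          intro h
          exact hni (h ▸ List.mem_map_of_mem hp)
        simp [List.count_cons, Ne.symm hpi]
      · congr 1
        · simp [List.count_cons]; omega
        · apply List.map_congr_left
          intro k hk
          have hki : k ≠ i := by
            have := (List.mem_filter.mp (List.mem_filter.mp hk).1).2
            simpa using this
          simp [List.count_cons, Ne.symm hki]

theorem pvFO_nodup (l : List String) : (pvFO l).Nodup := by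
  induction l with
  | nil => simp [pvFO]
  | cons i l ih =>
    simp only [pvFO, List.nodup_cons]
    constructor
    · intro h
      have := (List.mem_filter.mp h).2
      simp at this
    · exact ih.filter _

theorem pv_afold (msg : String) (lst : List String) : ∀ (d : PySem.Dict String Int), d.keys.Nodup →
    (lst.foldl (fun Company i =>
      if PySem.Str.count msg i != 0 && !(Company.contains i) then
        Company.insert i (PySem.Str.count msg i : Int)
      else if PySem.Str.count msg i != 0 && Company.contains i then
        Company.insert i (Company.getD i 0 + (PySem.Str.count msg i : Int))
      else Company) d).items
      = d.items.map (fun p => (p.1, p.2 + (PySem.Str.count msg p.1 : Int) * (lst.count p.1 : Int)))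
        ++ ((pvFO lst).filter (fun k => PySem.Str.count msg k != 0 && !(d.contains k))).map
            (fun k => (k, (PySem.Str.count msg k : Int) * (lst.count k : Int))) := by
  induction lst with
  | nil => intro d hd; simp [pvFO]
  | cons i lst ih =>
    intro d hd
    simp only [List.foldl_cons]
    by_cases h1 : (PySem.Str.count msg i != 0) = true
    · by_cases h2 : d.contains i = true
      · rw [if_neg (by simp [h2]), if_pos (by simp [h2]; simpa using h1)]
        rw [ih (d.insert i (d.getD i 0 + (PySem.Str.count msg i : Int)))
          (by rw [PySem.Dict.keys_insert_of_contains d _ h2]; exact hd)]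
        rw [PySem.Dict.items_insert_of_contains d _ h2]
        congr 1
        · rw [List.map_map]
          apply List.map_congr_left
          intro p hp
          by_cases hpi : p.1 = i
          · have hv : d.getD i 0 = p.2 := by
              have : (i, p.2) ∈ d.items := by rw [← hpi]; exact hp
              exact PySem.Dict.getD_of_mem_items d this hd 0
            simp only [Function.comp_apply, hpi, beq_self_eq_true, if_pos]
            simp [hv, List.count_cons, hpi]
            ring
          · have : (p.1 == i) = false := by simp [hpi]
            simp only [Function.comp_apply, this, Bool.false_eq_true, if_neg]
            simp [List.count_cons, Ne.symm hpi]
        · have h4 : (pvFO (i :: lst)).filter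
              (fun k => PySem.Str.count msg k != 0 && !(d.contains k))
              = ((pvFO lst).filter (fun k => k != i)).filter
                  (fun k => PySem.Str.count msg k != 0 && !(d.contains k)) := by
            simp [pvFO, h2]
          rw [h4, pv_filter_fo_step _ _ _ (by simp [h2])]
          have h3 : ((pvFO lst).filter
                (fun k => PySem.Str.count msg k != 0
                  && !((d.insert i (d.getD i 0 + (PySem.Str.count msg i : Int))).contains k)))
              = ((pvFO lst).filter (fun k => PySem.Str.count msg k != 0 && !(d.contains k))) := by
            apply List.filter_congr
            intro k _
            rw [PySem.Dict.contains_insert]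
            by_cases hki : k = i
            · simp [hki, h2]
            · have hb : (k == i) = false := by simpa using hki
              simp [hb]
          rw [h3]
          apply List.map_congr_left
          intro k hk
          have hki : k ≠ i := by
            rcases List.mem_filter.mp hk with ⟨_, hc⟩
            intro h; rw [h] at hc; simp [h2] at hc
          simp [List.count_cons, Ne.symm hki]
      · rw [if_pos (by simp [h2]; simpa using h1)]
        have h2' : d.contains i = false := by simpa using h2
        have hni : i ∉ d.keys := fun h => h2 ((PySem.Dict.contains_iff_mem_keys d i).mpr h)
        rw [ih (d.insert i (PySem.Str.count msg i : Int))
          (by rw [PySem.Dict.keys_insert_of_not_contains d _ h2']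
              simp [List.nodup_append, hd]; exact fun a ha h => hni (h ▸ ha))]
        rw [PySem.Dict.items_insert_of_not_contains d _ h2']
        have h3 : ((pvFO lst).filter
              (fun k => PySem.Str.count msg k != 0
                && !((d.insert i (PySem.Str.count msg i : Int)).contains k)))
            = ((pvFO lst).filter (fun k => k != i)).filter
                (fun k => PySem.Str.count msg k != 0 && !(d.contains k)) := by
          rw [List.filter_filter]
          apply List.filter_congr
          intro k _
          rw [PySem.Dict.contains_insert]
          by_cases hki : k = i
          · simp [hki]
          · simp only [Bool.not_or, bne, hki]
            simp [hki, Bool.and_comm, Bool.and_left_comm, Bool.and_assoc]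
        rw [h3]
        have h4 : (pvFO (i :: lst)).filter
            (fun k => PySem.Str.count msg k != 0 && !(d.contains k))
            = i :: (((pvFO lst).filter (fun k => k != i)).filter
                (fun k => PySem.Str.count msg k != 0 && !(d.contains k))) := by
          have hc1 : ¬ PySem.Chars.count msg.toList i.toList = 0 := by simpa using h1
          simp [pvFO, h2', hc1]
        rw [h4]
        simp only [List.map_append, List.map_cons, List.map_nil, List.append_assoc,
          List.cons_append, List.nil_append]
        congr 1
        · apply List.map_congr_left
          intro p hp
          have hpi : p.1 ≠ i := by
            intro h
            exact hni (h ▸ List.mem_map_of_mem hp)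
          simp [List.count_cons, Ne.symm hpi]
        · congr 1
          · simp [List.count_cons]
            ring
          · apply List.map_congr_left
            intro k hk
            have hki : k ≠ i := by
              have := (List.mem_filter.mp (List.mem_filter.mp hk).1).2
              simpa using this
            simp [List.count_cons, Ne.symm hki]
    · have h1' : (PySem.Str.count msg i != 0) = false := by simpa using h1
      have hc0 : PySem.Chars.count msg.toList i.toList = 0 := by simpa using h1'
      rw [if_neg (by simp [hc0]), if_neg (by simp [hc0])]
      rw [ih d hd]
      congr 1
      · apply List.map_congr_left
        intro p hp
        by_cases hpi : p.1 = i
        · simp [hpi, hc0]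
        · simp [List.count_cons, Ne.symm hpi]
      · have h4 : (pvFO (i :: lst)).filter
            (fun k => PySem.Str.count msg k != 0 && !(d.contains k))
            = ((pvFO lst).filter (fun k => k != i)).filter
                (fun k => PySem.Str.count msg k != 0 && !(d.contains k)) := by
          simp [pvFO, hc0]
        rw [h4, pv_filter_fo_step _ _ _ (by simp [hc0])]
        apply List.map_congr_left
        intro k hk
        have hki : k ≠ i := by
          rcases List.mem_filter.mp hk with ⟨hm, hc⟩
          intro h
          rw [h] at hc
          simp [hc0] at hc
        simp [List.count_cons, Ne.symm hki]

theorem pv_bfold (msg : String) : ∀ (ps : List (String × Int)) (d : PySem.Dict String Int),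
    (∀ p ∈ ps, d.contains p.1 = false) → (ps.map (·.1)).Nodup →
    (ps.foldl (fun Company p =>
        let c : Int := (PySem.Str.count msg p.1 : Int)
        if c != 0 then Company.insert p.1 (c * p.2) else Company) d).items
      = d.items ++ ps.filterMap (fun p => if (PySem.Str.count msg p.1 : Int) != 0
            then some (p.1, (PySem.Str.count msg p.1 : Int) * p.2) else none) := by
  intro ps
  induction ps with
  | nil => intro d _ _; simp
  | cons p ps ih =>
    intro d hfresh hnd
    rw [List.map_cons] at hnd
    obtain ⟨hnotin, hndtail⟩ := List.nodup_cons.mp hnd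
    simp only [List.foldl_cons, List.filterMap_cons]
    by_cases hc : ((PySem.Str.count msg p.1 : Int) != 0) = true
    · simp only [hc, if_pos]
      have hp : d.contains p.1 = false := hfresh p (List.mem_cons_self)
      rw [ih (d.insert p.1 ((PySem.Str.count msg p.1 : Int) * p.2))
        (by
          intro q hq
          rw [PySem.Dict.contains_insert]
          have h1 : (q.1 == p.1) = false := by
            have hne : q.1 ≠ p.1 := by
              intro h
              exact hnotin (h ▸ List.mem_map_of_mem hq)
            simpa using hne
          rw [h1, hfresh q (List.mem_cons_of_mem _ hq)]
          rfl)
        hndtail]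
      rw [PySem.Dict.items_insert_of_not_contains d _ hp]
      simp [hc, List.append_assoc]
    · have hc' : ((PySem.Str.count msg p.1 : Int) != 0) = false := by simpa using hc
      simp only [hc', Bool.false_eq_true, if_neg, if_false]
      exact ih d (fun q hq => hfresh q (List.mem_cons_of_mem _ hq)) hndtail

theorem pv_filterMap_if (l : List String) (p : String → Bool) (f : String → String × Int) :
    l.filterMap (fun k => if p k then some (f k) else none) = (l.filter p).map f := by
  induction l with
  | nil => simp
  | cons a l ih =>
    by_cases h : p a = true <;> simp [h, ih]

theorem pv_A_items (lst : List String) (msg : String) :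
    StackOfCompany lst msg =
      ((pvFO lst).filter (fun k => PySem.Str.count msg k != 0)).map
        (fun k => (k, (PySem.Str.count msg k : Int) * (lst.count k : Int))) := by
  unfold StackOfCompany
  rw [pv_afold msg lst PySem.Dict.empty (by simp [PySem.Dict.keys_empty])]
  simp only [PySem.Dict.contains_empty, Bool.not_false, Bool.and_true]
  simp [PySem.Dict.empty, PySem.Dict.items]

theorem pv_B_items (lst : List String) (msg : String) :
    StackOfCompany_alt lst msg =
      ((pvFO lst).filter (fun k => PySem.Str.count msg k != 0)).map
        (fun k => (k, (PySem.Str.count msg k : Int) * (lst.count k : Int))) := by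
  unfold StackOfCompany_alt
  have hcounts : (lst.foldl (fun d i => d.insert i (d.getD i 0 + 1)) PySem.Dict.empty).items
      = (pvFO lst).map (fun k => (k, (lst.count k : Int))) := by
    rw [pv_cfold lst PySem.Dict.empty (by simp [PySem.Dict.keys_empty])]
    simp [PySem.Dict.contains_empty, PySem.Dict.empty, PySem.Dict.items]
  simp only [hcounts]
  rw [pv_bfold msg _ PySem.Dict.empty
    (by intro p _; exact PySem.Dict.contains_empty _)
    (by
      rw [List.map_map]
      have : ((fun x : String × Int => x.1) ∘ fun k : String => (k, (lst.count k : Int))) = id := rfl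
      rw [this, List.map_id]
      exact pvFO_nodup lst)]
  rw [List.filterMap_map]
  have : ((fun p : String × Int => if (PySem.Str.count msg p.1 : Int) != 0
        then some (p.1, (PySem.Str.count msg p.1 : Int) * p.2) else none)
      ∘ (fun k => (k, (lst.count k : Int))))
      = (fun k => if (PySem.Str.count msg k != 0)
        then some (k, (PySem.Str.count msg k : Int) * (lst.count k : Int)) else none) := by
    funext k
    simp only [Function.comp_apply]
    by_cases h : PySem.Str.count msg k = 0
    · simp [h]
    · simp [h]
  rw [this, pv_filterMap_if]
  simp [PySem.Dict.empty, PySem.Dict.items]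

-- ===== VERDICT (by name: the statement is the Claim_ definition above) =====
theorem StackOfCompany_spec : Claim_equal_StackOfCompany := by
  intro lst msg _
  unfold Spec_StackOfCompany
  rw [pv_A_items, pv_B_items]
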